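-- pv_equiv track=rewrite | github.com/enduringwriter/Python_COMSC_140 | As7_8_Find_Substring_of_Ordered_Letters_in_a_String/main.py | hasARE
-- ===== SOURCE A (Python) =====
-- def hasARE(words):
--     """
--     This program finds words that contain the letters 'a', 'r', and 'e' in sequence.
--
--     Assumptions: string input is lowercase, and algorithm checks for lowercase only
--     """
--
--     are = ['a', 'r', 'e']
--     result = []
--
--     # for word in words:
--     #     check_subset = 0
--     #     for character in word:
--     #         if character == are[check_subset]:
--     #             check_subset += 1
--     #             if check_subset == len(are):
--     #                 result.append(word)
--     #                 break  # end program once subset is found to prevent further iteration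
--
--     # alternate solution using .find()
--     for word in words:
--         check_subset = 0
--         for char in are:  # or can use: for char in 'are':
--             check_subset = word.find(char, check_subset)
--             if check_subset == -1:
--                 break  # -1 is returned if a character is not found
--             check_subset += 1
--         else:
--             result.append(word)
--
--     return result
-- ===== SOURCE B (Python) =====
-- def hasARE(words):
--     """Single forward pass over each word's characters, advancing an index
--     into the pattern 'are'; no .find calls."""
--     result = []
--     for word in words:
--         i = 0
--         for ch in word:
--             if i < 3 and ch == "are"[i]:
--                 i += 1
--                 if i == 3:
--                     result.append(word)
--                     break
--     return result
-- ===== Notes on version B (the rewrite author's own statement) =====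
-- stated objective: alternative
-- what changed: B scans each word's characters once left-to-right advancing an index into the pattern 'are', instead of A's repeated str.find calls (one per pattern letter) with a moving start offset.
import Mathlib
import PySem

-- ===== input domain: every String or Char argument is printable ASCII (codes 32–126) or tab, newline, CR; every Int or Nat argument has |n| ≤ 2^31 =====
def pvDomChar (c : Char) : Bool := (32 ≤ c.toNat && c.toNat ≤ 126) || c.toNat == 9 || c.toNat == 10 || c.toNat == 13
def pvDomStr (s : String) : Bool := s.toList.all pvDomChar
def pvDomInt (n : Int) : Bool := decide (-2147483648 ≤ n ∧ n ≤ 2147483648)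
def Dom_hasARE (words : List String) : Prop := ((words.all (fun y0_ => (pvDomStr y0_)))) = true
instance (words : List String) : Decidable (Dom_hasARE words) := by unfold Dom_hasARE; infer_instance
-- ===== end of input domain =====

-- B replaces A's chain of str.find calls by a single forward scan of each word
-- advancing an index into the pattern; return values are proved equal on all inputs.

-- ===== PORT A =====
-- inner for-loop over are = ['a','r','e'] with the for/else; state = check_subset
def hasAREcheck (w : List Char) : List Char → Int → Bool
  | [], _ => true            -- loop finished without break: the 'else' appends
  | c :: rest, check =>
      let f := PySem.Chars.findFrom w [c] check none
      if f = -1 then false else hasAREcheck w rest (f + 1)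

def hasARE (words : List String) : List String :=
  words.foldl (fun result word =>
    if hasAREcheck word.toList ['a', 'r', 'e'] 0 then result ++ [word] else result) []

-- ===== PORT B =====
-- single pass over the word's characters, advancing through the remaining pattern
def bscan : List Char → List Char → Bool
  | [], _ => true
  | _ :: _, [] => false
  | p :: ps, c :: cs => if c = p then bscan ps cs else bscan (p :: ps) cs

def hasARE_alt (words : List String) : List String :=
  words.foldl (fun result word =>
    if bscan ['a', 'r', 'e'] word.toList then result ++ [word] else result) []

-- ===== PRECONDITION & SPEC =====
def Spec_hasARE (words : List String) (out : List String) : Prop := out = hasARE_alt words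
instance (words : List String) (out : List String) : Decidable (Spec_hasARE words out) := by unfold Spec_hasARE; infer_instance

-- ===== CLAIM (what is proved, stated in full; the proofs are below) =====
def Claim_equal_hasARE : Prop := ∀ (words : List String), Dom_hasARE words → Spec_hasARE words (hasARE words)

-- ===== LEMMAS AND PROOFS =====

-- [c] is a prefix of l.drop i iff l has c at index i
lemma singleton_prefix_drop {c : Char} {l : List Char} {i : Nat} :
    [c] <+: l.drop i ↔ l[i]? = some c := by
  constructor
  · rintro ⟨t, ht⟩
    have h0 : (l.drop i)[0]? = some c := by rw [← ht]; rfl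
    rw [List.getElem?_drop] at h0
    simpa using h0
  · intro h
    have hi : i < l.length := by
      by_contra hge
      simp [List.getElem?_eq_none (by omega : l.length ≤ i)] at h
    have hc : l[i] = c := by
      rw [List.getElem?_eq_getElem hi] at h; exact Option.some.inj h
    have hd : l.drop i = c :: l.drop (i + 1) := by
      rw [List.drop_eq_getElem_cons hi, hc]
    exact ⟨l.drop (i + 1), by rw [hd]; rfl⟩

-- c ∉ l → B's scan fails on pattern c :: ps
lemma bscan_not_mem {c : Char} (ps : List Char) {l : List Char} (h : c ∉ l) :
    bscan (c :: ps) l = false := by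
  induction l with
  | nil => rfl
  | cons a t ih =>
      have hac : ¬ a = c := fun hac => h (by simp [hac])
      simp [bscan, hac]
      exact ih (fun hm => h (List.mem_cons_of_mem _ hm))

-- greedy step: if j is the FIRST index of c in l, matching c there loses nothing
lemma bscan_greedy {c : Char} (ps : List Char) :
    ∀ (l : List Char) (j : Nat), l[j]? = some c → (∀ i, i < j → l[i]? ≠ some c) →
      bscan (c :: ps) l = bscan ps (l.drop (j + 1)) := by
  intro l
  induction l with
  | nil => intro j hj; simp at hj
  | cons a t ih =>
      intro j hjc hmin
      cases j with
      | zero =>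
          have : a = c := by simpa using hjc
          simp [bscan, this]
      | succ m =>
          have hac : ¬ a = c := by
            have := hmin 0 (by omega)
            simpa using this
          have ht : bscan (c :: ps) t = bscan ps (t.drop (m + 1)) := by
            refine ih m (by simpa using hjc) ?_
            intro i hi
            have := hmin (i + 1) (by omega)
            simpa using this
          simp [bscan, hac, ht]

-- the per-word booleans agree: A's find-chain from offset k = B's scan of the rest
lemma check_eq_bscan (pat : List Char) : ∀ (w : List Char) (k : Nat), k ≤ w.length →
    hasAREcheck w pat (k : Int) = bscan pat (w.drop k) := by
  induction pat with
  | nil => intro w k _; simp [hasAREcheck, bscan]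
  | cons c ps ih =>
      intro w k hk
      have hff := PySem.Chars.findFrom_natCast w [c] k hk
      by_cases hfind : PySem.Chars.find (w.drop k) [c] = -1
      · -- c does not occur at or after k: both sides fail
        have hnin : c ∉ w.drop k := by
          have hinf := (PySem.Chars.find_eq_neg_one_iff (w.drop k) [c]).mp hfind
          intro hm
          rcases List.append_of_mem hm with ⟨s, t, hst⟩
          exact hinf ⟨s, t, by rw [hst]; simp⟩
        rw [bscan_not_mem ps hnin]
        simp [hasAREcheck, hff, hfind]
      · -- c found at first index j of w.drop k
        have hnn : 0 ≤ PySem.Chars.find (w.drop k) [c] := by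
          have := PySem.Chars.neg_one_le_find (w.drop k) [c]
          omega
        set j := (PySem.Chars.find (w.drop k) [c]).toNat with hjdef
        have hjf : PySem.Chars.find (w.drop k) [c] = (j : Int) := by omega
        obtain ⟨hpre, hmin⟩ := PySem.Chars.find_spec (s := w.drop k) (sub := [c]) hnn
        have hget : (w.drop k)[j]? = some c := singleton_prefix_drop.mp hpre
        have hjlt : j < (w.drop k).length := by
          by_contra hge
          simp [List.getElem?_eq_none (by omega : (w.drop k).length ≤ j)] at hget
        have hjlt' : k + j + 1 ≤ w.length := by
          have := List.length_drop (l := w) (i := k)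
          omega
        have hstate : ((k : Int) + PySem.Chars.find (w.drop k) [c] + 1) = ((k + j + 1 : Nat) : Int) := by
          rw [hjf]; push_cast; ring
        have hrec := ih w (k + j + 1) hjlt'
        have hgoalB : bscan (c :: ps) (w.drop k) = bscan ps ((w.drop k).drop (j + 1)) := by
          refine bscan_greedy ps (w.drop k) j hget ?_
          intro i hi hic
          exact hmin i hi (singleton_prefix_drop.mpr hic)
        have hdd : (w.drop k).drop (j + 1) = w.drop (k + j + 1) := by
          rw [List.drop_drop]; ring_nf
        simp only [hasAREcheck, hff, if_neg hfind]
        rw [if_neg (by omega : ¬ ((k : Int) + PySem.Chars.find (w.drop k) [c]) = -1)]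
        rw [hstate, hrec, hgoalB, hdd]

lemma perword (w : List Char) :
    hasAREcheck w ['a', 'r', 'e'] 0 = bscan ['a', 'r', 'e'] w := by
  have := check_eq_bscan ['a', 'r', 'e'] w 0 (Nat.zero_le _)
  simpa using this

lemma fold_eq : ∀ (ws : List String) (acc : List String),
    ws.foldl (fun result word =>
      if hasAREcheck word.toList ['a', 'r', 'e'] 0 then result ++ [word] else result) acc
    = ws.foldl (fun result word =>
      if bscan ['a', 'r', 'e'] word.toList then result ++ [word] else result) acc := by
  intro ws
  induction ws with
  | nil => intro acc; rfl
  | cons w t ih => intro acc; simp only [List.foldl, perword w.toList, ih]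

-- ===== VERDICT (by name: the statement is the Claim_ definition above) =====
theorem hasARE_spec : Claim_equal_hasARE := by
  intro words _
  unfold Spec_hasARE hasARE hasARE_alt
  exact fold_eq words []
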